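-- pv_equiv track=rewrite | github.com/gv-wq/bunkering-chat-bot | app/services/utils/utils.py | distributed_pick
-- ===== SOURCE A (Python) =====
-- def distributed_pick(items, max_count):
--     if not items or max_count <= 0:
--         return []
--
--     picked = []
--     visited = set()
--
--     def pick_range(l, r):
--         if len(picked) >= max_count or l > r:
--             return
--
--         mid = (l + r) // 2
--
--         for idx in (l, r, mid):
--             if idx not in visited and 0 <= idx < len(items):
--                 visited.add(idx)
--                 picked.append(items[idx])
--                 if len(picked) >= max_count:
--                     return
--
--         pick_range(l, mid - 1)
--         pick_range(mid + 1, r)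
--
--     pick_range(0, len(items) - 1)
--     return picked[:max_count]
-- ===== SOURCE B (Python) =====
-- def distributed_pick(items, max_count):
--     if not items or max_count <= 0:
--         return []
--     # Phase 1: generate the full visit order (l, r, mid per range) with an explicit stack.
--     order = []
--     stack = [(0, len(items) - 1)]
--     while stack:
--         l, r = stack.pop()
--         if l > r:
--             continue
--         mid = (l + r) // 2
--         order.append(l)
--         order.append(r)
--         order.append(mid)
--         stack.append((mid + 1, r))
--         stack.append((l, mid - 1))
--     # Phase 2: take the first max_count distinct indices in that order.
--     seen = set()
--     out = []
--     for i in order: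
--         if i not in seen:
--             seen.add(i)
--             out.append(items[i])
--             if len(out) == max_count:
--                 break
--     return out
-- ===== Notes on version B (the rewrite author's own statement) =====
-- stated objective: alternative
-- what changed: A's single recursion interleaves visiting l/r/mid, a visited-set, an early return on reaching max_count and recursive descent; B splits the job into two phases: an explicit-stack loop that generates the complete visit order, then one linear dedup-and-take pass over that order.
import Mathlib
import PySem

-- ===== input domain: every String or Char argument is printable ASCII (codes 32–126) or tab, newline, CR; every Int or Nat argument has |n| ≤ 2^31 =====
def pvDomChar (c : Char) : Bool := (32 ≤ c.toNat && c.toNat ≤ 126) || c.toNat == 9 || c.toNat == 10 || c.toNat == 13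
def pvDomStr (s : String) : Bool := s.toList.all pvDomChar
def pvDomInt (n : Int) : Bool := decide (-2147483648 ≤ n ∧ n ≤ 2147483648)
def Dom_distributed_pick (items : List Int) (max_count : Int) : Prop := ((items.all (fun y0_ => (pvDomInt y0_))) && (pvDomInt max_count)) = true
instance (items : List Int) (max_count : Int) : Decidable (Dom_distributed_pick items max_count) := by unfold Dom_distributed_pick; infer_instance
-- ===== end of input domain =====

-- B replaces A's interleaved recursion (visit + early return + recurse) by two explicit phases:
-- an explicit-stack loop generating the whole visit order, then one dedup/take pass (objective: alternative).

-- ===== PORT A =====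
-- the inner for-loop 'for idx in (l, r, mid)': returns (state, early) where early = True means
-- the Python 'return' inside the loop fired (picked reached max_count after an append)
def visitLoopA (items : List Int) (max_count : Int) :
    (List Int × PySem.Set Int) → List Int → (List Int × PySem.Set Int) × Bool
  | s, [] => (s, false)
  | s, idx :: rest =>
    if ¬ PySem.Set.contains s.2 idx ∧ 0 ≤ idx ∧ idx < (items.length : Int) then
      -- items[idx] is exact here: the branch condition gives 0 ≤ idx < len(items)
      let s' := (s.1 ++ [PySem.List.pyGetD items idx 0], PySem.Set.add s.2 idx)
      if (s'.1.length : Int) ≥ max_count then (s', true)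
      else visitLoopA items max_count s' rest
    else visitLoopA items max_count s rest

-- pick_range, threading the closure state (picked, visited)
def pickRangeA (items : List Int) (max_count : Int) (l r : Int)
    (st : List Int × PySem.Set Int) : List Int × PySem.Set Int :=
  if (st.1.length : Int) ≥ max_count ∨ l > r then st
  else
    let mid := PySem.Int.floordiv (l + r) 2
    let p := visitLoopA items max_count st [l, r, mid]
    if p.2 then p.1
    else pickRangeA items max_count (mid + 1) r (pickRangeA items max_count l (mid - 1) p.1)
termination_by (r + 1 - l).toNat
decreasing_by
  all_goals
    have hm := PySem.Int.floordiv_two_mid_bounds (lo := l) (hi := r) (by omega)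
    omega

def distributed_pick (items : List Int) (max_count : Int) : List Int :=
  if items = [] ∨ max_count ≤ 0 then []
  else
    let st := pickRangeA items max_count 0 ((items.length : Int) - 1) ([], PySem.Set.empty)
    PySem.List.slice st.1 none (some max_count)

-- ===== PORT B =====
-- phase 1: explicit stack, emits l, r, mid per non-empty range; pushes (mid+1,r) below (l,mid-1)
def genStackB (stack : List (Int × Int)) (order : List Int) : List Int :=
  match stack with
  | [] => order
  | (l, r) :: rest =>
    if l > r then genStackB rest order
    else
      let mid := PySem.Int.floordiv (l + r) 2
      genStackB ((l, mid - 1) :: (mid + 1, r) :: rest) (order ++ [l, r, mid])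
termination_by (stack.map (fun p => 2 * (p.2 + 1 - p.1).toNat + 1)).sum
decreasing_by
  all_goals try have _hm := PySem.Int.floordiv_two_mid_bounds (lo := l) (hi := r) (by omega)
  all_goals simp
  all_goals omega

-- phase 2: first max_count distinct indices, in order
def selectB (items : List Int) (max_count : Int) :
    List Int → PySem.Set Int → List Int → List Int
  | [], _, out => out
  | i :: rest, seen, out =>
    if ¬ PySem.Set.contains seen i then
      -- items[i] is exact: every generated index satisfies 0 ≤ i < len(items)
      let out' := out ++ [PySem.List.pyGetD items i 0]
      if (out'.length : Int) = max_count then out'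
      else selectB items max_count rest (PySem.Set.add seen i) out'
    else selectB items max_count rest seen out

def distributed_pick_alt (items : List Int) (max_count : Int) : List Int :=
  if items = [] ∨ max_count ≤ 0 then []
  else
    selectB items max_count (genStackB [(0, (items.length : Int) - 1)] []) PySem.Set.empty []

-- ===== PRECONDITION & SPEC =====
def Spec_distributed_pick (items : List Int) (max_count : Int) (out : List Int) : Prop := out = distributed_pick_alt items max_count
instance (items : List Int) (max_count : Int) (out : List Int) : Decidable (Spec_distributed_pick items max_count out) := by unfold Spec_distributed_pick; infer_instance

-- ===== CLAIM (what is proved, stated in full; the proofs are below) =====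
def Claim_equal_distributed_pick : Prop := ∀ (items : List Int) (max_count : Int), Dom_distributed_pick items max_count → Spec_distributed_pick items max_count (distributed_pick items max_count)

-- ===== LEMMAS AND PROOFS =====

-- ghost: the full visit order of A's recursion, as a pure list
def genA (l r : Int) : List Int :=
  if l > r then []
  else
    let mid := PySem.Int.floordiv (l + r) 2
    [l, r, mid] ++ genA l (mid - 1) ++ genA (mid + 1) r
termination_by (r + 1 - l).toNat
decreasing_by
  all_goals
    have hm := PySem.Int.floordiv_two_mid_bounds (lo := l) (hi := r) (by omega)
    omega

-- ghost: one guarded step of the selection, over state (picked, visited)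
def stepF (items : List Int) (max_count : Int)
    (s : List Int × PySem.Set Int) (idx : Int) : List Int × PySem.Set Int :=
  if (s.1.length : Int) ≥ max_count then s
  else if ¬ PySem.Set.contains s.2 idx ∧ 0 ≤ idx ∧ idx < (items.length : Int) then
    (s.1 ++ [PySem.List.pyGetD items idx 0], PySem.Set.add s.2 idx)
  else s

theorem full_fold (items : List Int) (mc : Int) (st : List Int × PySem.Set Int)
    (xs : List Int) (h : (st.1.length : Int) ≥ mc) :
    List.foldl (stepF items mc) st xs = st := by
  induction xs with
  | nil => rfl
  | cons x xs ih => simp [List.foldl, stepF, h, ih]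

theorem len_fold (items : List Int) (mc : Int) (st : List Int × PySem.Set Int)
    (xs : List Int) (h : (st.1.length : Int) ≤ mc) :
    ((List.foldl (stepF items mc) st xs).1.length : Int) ≤ mc := by
  induction xs generalizing st with
  | nil => exact h
  | cons x xs ih =>
    simp only [List.foldl]
    unfold stepF
    split
    · exact ih st h
    · split
      · exact ih _ (by simpa using by omega)
      · exact ih st h

theorem visitLoopA_eq (items : List Int) (mc : Int) (s : List Int × PySem.Set Int)
    (xs : List Int) (h : ¬ (s.1.length : Int) ≥ mc) :
    visitLoopA items mc s xs =
      (List.foldl (stepF items mc) s xs,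
       decide ((List.foldl (stepF items mc) s xs).1.length ≥ (mc : Int))) := by
  induction xs generalizing s with
  | nil => simp [visitLoopA, h]
  | cons x xs ih =>
    rw [visitLoopA]
    by_cases hc : ¬ PySem.Set.contains s.2 x ∧ 0 ≤ x ∧ x < (items.length : Int)
    · rw [if_pos hc]
      have hstep : stepF items mc s x =
          (s.1 ++ [PySem.List.pyGetD items x 0], PySem.Set.add s.2 x) := by
        simp only [stepF, if_neg h]
        rw [if_pos hc]
      by_cases hf : ((s.1 ++ [PySem.List.pyGetD items x 0]).length : Int) ≥ mc
      · rw [if_pos hf]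
        simp only [List.foldl_cons, hstep]
        rw [full_fold items mc _ xs hf]
        simp at hf ⊢
        omega
      · rw [if_neg hf]
        simp only [List.foldl_cons, hstep]
        exact ih _ hf
    · rw [if_neg hc]
      have hstep : stepF items mc s x = s := by
        simp only [stepF, if_neg h]
        rw [if_neg hc]
      simp only [List.foldl_cons, hstep]
      exact ih s h

theorem pickRangeA_eq_fold (items : List Int) (mc : Int) (l r : Int)
    (st : List Int × PySem.Set Int) :
    pickRangeA items mc l r st = List.foldl (stepF items mc) st (genA l r) := by
  rw [pickRangeA, genA]
  by_cases hfull : (st.1.length : Int) ≥ mc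
  · simp only [hfull, true_or, if_true]
    split
    · rfl
    · rw [full_fold items mc st _ hfull]
  · by_cases hlr : l > r
    · simp [hfull, hlr]
    · simp only [hfull, hlr, or_self, if_false]
      rw [visitLoopA_eq items mc st [l, r, PySem.Int.floordiv (l + r) 2] hfull]
      split
      · next hmf =>
        simp only [decide_eq_true_eq] at hmf
        rw [List.foldl_append, List.foldl_append]
        rw [full_fold items mc _ _ hmf, full_fold items mc _ _ hmf]
      · next hmf =>
        rw [pickRangeA_eq_fold items mc l (PySem.Int.floordiv (l + r) 2 - 1),
            pickRangeA_eq_fold items mc (PySem.Int.floordiv (l + r) 2 + 1) r]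
        rw [List.foldl_append, List.foldl_append]
termination_by (r + 1 - l).toNat
decreasing_by
  all_goals
    have hm := PySem.Int.floordiv_two_mid_bounds (lo := l) (hi := r) (by omega)
    omega

theorem genStackB_eq (stack : List (Int × Int)) (order : List Int) :
    genStackB stack order = order ++ stack.flatMap (fun p => genA p.1 p.2) := by
  match stack with
  | [] => simp [genStackB]
  | (l, r) :: rest =>
    rw [genStackB]
    by_cases hlr : l > r
    · rw [if_pos hlr, genStackB_eq rest order]
      have hnil : genA l r = [] := by rw [genA]; simp [hlr]
      simp [hnil]
    · rw [if_neg hlr]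
      rw [genStackB_eq ((l, PySem.Int.floordiv (l + r) 2 - 1) ::
            (PySem.Int.floordiv (l + r) 2 + 1, r) :: rest)
            (order ++ [l, r, PySem.Int.floordiv (l + r) 2])]
      have hg : genA l r = [l, r, PySem.Int.floordiv (l + r) 2] ++
          genA l (PySem.Int.floordiv (l + r) 2 - 1) ++
          genA (PySem.Int.floordiv (l + r) 2 + 1) r := by
        rw [genA]; simp [hlr]
      simp [hg]
termination_by (stack.map (fun p => 2 * (p.2 + 1 - p.1).toNat + 1)).sum
decreasing_by
  all_goals try have _hm := PySem.Int.floordiv_two_mid_bounds (lo := l) (hi := r) (by omega)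
  all_goals simp
  all_goals omega

theorem mem_genA (l r i : Int) (h : i ∈ genA l r) : l ≤ i ∧ i ≤ r := by
  rw [genA] at h
  by_cases hlr : l > r
  · simp [hlr] at h
  · simp only [hlr, if_false, List.mem_append, List.mem_cons,
      List.not_mem_nil, or_false] at h
    rcases h with ((h | h | h) | h) | h
    · omega
    · omega
    · have hm := PySem.Int.floordiv_two_mid_bounds (lo := l) (hi := r) (by omega)
      omega
    · have hm := PySem.Int.floordiv_two_mid_bounds (lo := l) (hi := r) (by omega)
      have := mem_genA _ _ i h
      omega
    · have hm := PySem.Int.floordiv_two_mid_bounds (lo := l) (hi := r) (by omega)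
      have := mem_genA _ _ i h
      omega
termination_by (r + 1 - l).toNat
decreasing_by
  all_goals
    have _hm := PySem.Int.floordiv_two_mid_bounds (lo := l) (hi := r) (by omega)
    omega

theorem selectB_eq_fold (items : List Int) (mc : Int) (order : List Int)
    (seen : PySem.Set Int) (out : List Int)
    (hlt : (out.length : Int) < mc)
    (hr : ∀ i ∈ order, 0 ≤ i ∧ i < (items.length : Int)) :
    selectB items mc order seen out = (List.foldl (stepF items mc) (out, seen) order).1 := by
  induction order generalizing seen out with
  | nil => rfl
  | cons i rest ih =>
    have hri := hr i (by simp)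
    rw [selectB]
    by_cases hc : ¬ PySem.Set.contains seen i
    · rw [if_pos hc]
      have hstep : stepF items mc (out, seen) i =
          (out ++ [PySem.List.pyGetD items i 0], PySem.Set.add seen i) := by
        simp only [stepF, if_neg (not_le.mpr hlt)]
        rw [if_pos ⟨hc, hri.1, hri.2⟩]
      by_cases heq : ((out ++ [PySem.List.pyGetD items i 0]).length : Int) = mc
      · rw [if_pos heq]
        simp only [List.foldl_cons, hstep]
        rw [full_fold items mc _ rest (by simp at heq ⊢; omega)]
      · rw [if_neg heq]
        simp only [List.foldl_cons, hstep]
        exact ih _ _ (by simp at heq ⊢; omega) (fun j hj => hr j (by simp [hj]))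
    · rw [if_neg hc]
      have hstep : stepF items mc (out, seen) i = (out, seen) := by
        simp only [stepF, if_neg (not_le.mpr hlt)]
        rw [if_neg (fun h' => hc h'.1)]
      simp only [List.foldl_cons, hstep]
      exact ih seen out hlt (fun j hj => hr j (by simp [hj]))

-- ===== VERDICT (by name: the statement is the Claim_ definition above) =====
theorem distributed_pick_spec : Claim_equal_distributed_pick := by
  intro items mc _
  unfold Spec_distributed_pick distributed_pick distributed_pick_alt
  by_cases hg : items = [] ∨ mc ≤ 0
  · simp [hg]
  · simp only [hg, if_false]
    obtain ⟨hne, hmc⟩ := not_or.mp hg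
    have hn : (1 : Int) ≤ (items.length : Int) := by
      have := List.length_pos_iff.mpr hne
      omega
    rw [genStackB_eq, pickRangeA_eq_fold]
    simp only [List.flatMap_cons, List.flatMap_nil, List.append_nil, List.nil_append]
    rw [selectB_eq_fold items mc _ PySem.Set.empty [] (by simpa using by omega)
        (fun i hi => by have := mem_genA _ _ i hi; omega)]
    have hlen := len_fold items mc ([], PySem.Set.empty) (genA 0 ((items.length : Int) - 1))
      (by simp; omega)
    rw [PySem.List.slice_to _ (by omega)]
    exact List.take_of_length_le (by omega)
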